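-- pv_equiv track=rewrite | github.com/teamongdal/backend | search_dupe_sg_pattern_FINAL.py | map_index_to_json
-- ===== SOURCE A (Python) =====
-- def map_index_to_json(idx, products):
--     count = 0
--     for prod_idx, product in enumerate(products):
--         clothes = product.get("clothes", [])
--         for box_idx, cloth in enumerate(clothes):
--             if count == idx:
--                 return prod_idx, box_idx
--             count += 1
--     return None, None
-- ===== SOURCE B (Python) =====
-- def map_index_to_json(idx, products):
--     count = 0
--     for prod_idx, product in enumerate(products):
--         n = len(product.get("clothes", []))
--         if count <= idx < count + n:
--             return prod_idx, idx - count
--         count += n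
--     return None, None
-- ===== Notes on version B (the rewrite author's own statement) =====
-- stated objective: alternative
-- what changed: B replaces the box-by-box inner scan with a per-product length check: it sums len(clothes) per product and computes the box index arithmetically as idx - count, so the inner loop disappears.
import Mathlib
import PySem

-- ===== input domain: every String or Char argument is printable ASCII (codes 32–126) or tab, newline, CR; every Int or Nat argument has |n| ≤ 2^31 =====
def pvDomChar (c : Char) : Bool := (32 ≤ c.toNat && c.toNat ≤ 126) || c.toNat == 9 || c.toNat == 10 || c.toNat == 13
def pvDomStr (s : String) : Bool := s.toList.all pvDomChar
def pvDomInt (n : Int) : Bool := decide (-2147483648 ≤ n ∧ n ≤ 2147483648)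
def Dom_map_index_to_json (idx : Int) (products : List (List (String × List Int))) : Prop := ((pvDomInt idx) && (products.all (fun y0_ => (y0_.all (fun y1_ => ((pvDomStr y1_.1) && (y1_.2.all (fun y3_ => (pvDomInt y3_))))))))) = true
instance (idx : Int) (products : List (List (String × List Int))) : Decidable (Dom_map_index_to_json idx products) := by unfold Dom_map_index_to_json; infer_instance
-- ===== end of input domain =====

-- B walks product by product, summing len(clothes) and computing the box index arithmetically
-- as idx - count, so A's box-by-box inner scan disappears (alternative decomposition).

-- ===== PORT A =====
-- inner 'for box_idx, cloth in enumerate(clothes)' loop: returns the answer or the updated count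
def pvInnerA (idx prodIdx count boxIdx : Int) (clothes : List Int) :
    Sum (Option Int × Option Int) Int :=
  match clothes with
  | [] => .inr count
  | _ :: rest =>
      if count = idx then .inl (some prodIdx, some boxIdx)
      else pvInnerA idx prodIdx (count + 1) (boxIdx + 1) rest

-- outer 'for prod_idx, product in enumerate(products)' loop
def pvOuterA (idx count prodIdx : Int) (products : List (List (String × List Int))) :
    Option Int × Option Int :=
  match products with
  | [] => (none, none)
  | product :: rest =>
      let clothes := PySem.Dict.getD (PySem.Dict.mk product) "clothes" []
      match pvInnerA idx prodIdx count 0 clothes with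
      | .inl r => r
      | .inr count' => pvOuterA idx count' (prodIdx + 1) rest

def map_index_to_json (idx : Int) (products : List (List (String × List Int))) : Option Int × Option Int :=
  pvOuterA idx 0 0 products

-- ===== PORT B =====
def pvGoB (idx count prodIdx : Int) (products : List (List (String × List Int))) :
    Option Int × Option Int :=
  match products with
  | [] => (none, none)
  | product :: rest =>
      let n : Int := (PySem.Dict.getD (PySem.Dict.mk product) "clothes" []).length
      if count ≤ idx ∧ idx < count + n then (some prodIdx, some (idx - count))
      else pvGoB idx (count + n) (prodIdx + 1) rest

def map_index_to_json_alt (idx : Int) (products : List (List (String × List Int))) : Option Int × Option Int :=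
  pvGoB idx 0 0 products

-- ===== PRECONDITION & SPEC =====
def Spec_map_index_to_json (idx : Int) (products : List (List (String × List Int))) (out : Option Int × Option Int) : Prop := out = map_index_to_json_alt idx products
instance (idx : Int) (products : List (List (String × List Int))) (out : Option Int × Option Int) : Decidable (Spec_map_index_to_json idx products out) := by unfold Spec_map_index_to_json; infer_instance

-- ===== CLAIM (what is proved, stated in full; the proofs are below) =====
def Claim_equal_map_index_to_json : Prop := ∀ (idx : Int) (products : List (List (String × List Int))), Dom_map_index_to_json idx products → Spec_map_index_to_json idx products (map_index_to_json idx products)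

-- ===== LEMMAS AND PROOFS =====

-- A's inner loop, characterised: it either hits idx inside this product's clothes
-- (and the box index is idx - count, offset by the starting boxIdx) or falls through
-- with count advanced by the number of clothes.
theorem pvInnerA_eq (idx prodIdx : Int) (clothes : List Int) :
    ∀ count boxIdx : Int,
      pvInnerA idx prodIdx count boxIdx clothes =
        if count ≤ idx ∧ idx < count + (clothes.length : Int) then
          .inl (some prodIdx, some (boxIdx + (idx - count)))
        else .inr (count + (clothes.length : Int)) := by
  induction clothes with
  | nil =>
      intro count boxIdx
      simp only [pvInnerA, List.length_nil, Int.natCast_zero, add_zero]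
      rw [if_neg (by omega)]
  | cons c rest ih =>
      intro count boxIdx
      simp only [pvInnerA, ih]
      by_cases h : count = idx
      · subst h
        have hc : count ≤ count ∧ count < count + ((c :: rest).length : Int) :=
          ⟨le_refl _, by simp⟩
        rw [if_pos rfl, if_pos hc]
        simp
      · simp only [if_neg h]
        by_cases h2 : count + 1 ≤ idx ∧ idx < count + 1 + (rest.length : Int)
        · have h3 : count ≤ idx ∧ idx < count + ((c :: rest).length : Int) := by
            simp at h2 ⊢; omega
          rw [if_pos h2, if_pos h3]
          congr 3
          omega
        · have h3 : ¬ (count ≤ idx ∧ idx < count + ((c :: rest).length : Int)) := by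
            simp at h2 ⊢; omega
          rw [if_neg h2, if_neg h3]
          congr 1
          simp
          ring

theorem pvOuterA_eq_goB (idx : Int) (products : List (List (String × List Int))) :
    ∀ count prodIdx : Int,
      pvOuterA idx count prodIdx products = pvGoB idx count prodIdx products := by
  induction products with
  | nil => intro _ _; simp [pvOuterA, pvGoB]
  | cons p rest ih =>
      intro count prodIdx
      simp only [pvOuterA, pvGoB, pvInnerA_eq]
      by_cases h : count ≤ idx ∧ idx < count + ((PySem.Dict.getD (PySem.Dict.mk p) "clothes" []).length : Int)
      · simp [h]
      · simp [h, ih]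

-- ===== VERDICT (by name: the statement is the Claim_ definition above) =====
theorem map_index_to_json_spec : Claim_equal_map_index_to_json := by
  intro idx products _
  unfold Spec_map_index_to_json map_index_to_json map_index_to_json_alt
  exact pvOuterA_eq_goB idx products 0 0
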